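-- pv_equiv track=rewrite | github.com/think41/extrasuite | extrasheet/scripts/extract_batch_operations.py | categorize_operations
-- ===== SOURCE A (Python) =====
-- from collections import defaultdict
--
-- def categorize_operations(request_types: list[str]) -> dict[str, list[str]]:
--     """Categorize operations by their primary function."""
--     categories = defaultdict(list)
--
--     # Define categories based on operation name patterns
--     for op in request_types:
--         op_lower = op.lower()
--
--         if "cell" in op_lower or "values" in op_lower:
--             categories["Cell Data"].append(op)
--         elif "sheet" in op_lower and (
--             "add" in op_lower or "delete" in op_lower or "duplicate" in op_lower
--         ):
--             categories["Sheet Management"].append(op)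
--         elif "sheet" in op_lower:
--             categories["Sheet Properties"].append(op)
--         elif "row" in op_lower or "column" in op_lower or "dimension" in op_lower:
--             categories["Rows & Columns"].append(op)
--         elif "format" in op_lower or "border" in op_lower or "merge" in op_lower:
--             categories["Formatting"].append(op)
--         elif "chart" in op_lower:
--             categories["Charts"].append(op)
--         elif "filter" in op_lower:
--             categories["Filters"].append(op)
--         elif "pivot" in op_lower:
--             categories["Pivot Tables"].append(op)
--         elif "conditional" in op_lower:
--             categories["Conditional Formatting"].append(op)
--         elif "namedrange" in op_lower:
--             categories["Named Ranges"].append(op)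
--         elif "protected" in op_lower:
--             categories["Protection"].append(op)
--         elif "banded" in op_lower:
--             categories["Banded Ranges"].append(op)
--         elif "slicer" in op_lower:
--             categories["Slicers"].append(op)
--         elif "datasource" in op_lower:
--             categories["Data Sources"].append(op)
--         elif "developer" in op_lower or "metadata" in op_lower:
--             categories["Developer Metadata"].append(op)
--         elif "embed" in op_lower:
--             categories["Embedded Objects"].append(op)
--         elif "find" in op_lower or "replace" in op_lower:
--             categories["Find & Replace"].append(op)
--         elif "copy" in op_lower or "paste" in op_lower or "cut" in op_lower:
--             categories["Copy & Paste"].append(op)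
--         elif "sort" in op_lower:
--             categories["Sorting"].append(op)
--         elif "group" in op_lower:
--             categories["Grouping"].append(op)
--         elif "spreadsheet" in op_lower:
--             categories["Spreadsheet Properties"].append(op)
--         elif "table" in op_lower:
--             categories["Tables"].append(op)
--         elif "text" in op_lower:
--             categories["Text Operations"].append(op)
--         elif "trim" in op_lower:
--             categories["Data Cleanup"].append(op)
--         elif "refresh" in op_lower:
--             categories["Refresh"].append(op)
--         else:
--             categories["Other"].append(op)
--
--     return dict(categories)
-- ===== SOURCE B (Python) =====
-- # Staged re-implementation: label every operation by fully evaluating a CNF rules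
-- # table (list of matching categories, first hit wins), deduplicate the labels to
-- # get the output key order, then build each category's list by filtering a single
-- # zip of operations with their labels -- no mutable dict accumulator, no if/elif chain.
--
-- # (category, clauses): an operation matches when every clause has some substring hit.
-- _RULES = [
--     ("Cell Data", [("cell", "values")]),
--     ("Sheet Management", [("sheet",), ("add", "delete", "duplicate")]),
--     ("Sheet Properties", [("sheet",)]),
--     ("Rows & Columns", [("row", "column", "dimension")]),
--     ("Formatting", [("format", "border", "merge")]),
--     ("Charts", [("chart",)]),
--     ("Filters", [("filter",)]),
--     ("Pivot Tables", [("pivot",)]),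
--     ("Conditional Formatting", [("conditional",)]),
--     ("Named Ranges", [("namedrange",)]),
--     ("Protection", [("protected",)]),
--     ("Banded Ranges", [("banded",)]),
--     ("Slicers", [("slicer",)]),
--     ("Data Sources", [("datasource",)]),
--     ("Developer Metadata", [("developer", "metadata")]),
--     ("Embedded Objects", [("embed",)]),
--     ("Find & Replace", [("find", "replace")]),
--     ("Copy & Paste", [("copy", "paste", "cut")]),
--     ("Sorting", [("sort",)]),
--     ("Grouping", [("group",)]),
--     ("Spreadsheet Properties", [("spreadsheet",)]),
--     ("Tables", [("table",)]),
--     ("Text Operations", [("text",)]),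
--     ("Data Cleanup", [("trim",)]),
--     ("Refresh", [("refresh",)]),
-- ]
--
--
-- def _label(op: str) -> str:
--     low = op.lower()
--     hits = [cat for cat, clauses in _RULES
--             if all(any(p in low for p in clause) for clause in clauses)]
--     return hits[0] if hits else "Other"
--
--
-- def categorize_operations(request_types: list[str]) -> dict[str, list[str]]:
--     labels = [_label(op) for op in request_types]
--     order = list(dict.fromkeys(labels))
--     return {cat: [op for op, lab in zip(request_types, labels) if lab == cat]
--             for cat in order}
-- ===== Notes on version B (the rewrite author's own statement) =====
-- stated objective: alternative
-- what changed: Replaces A's single pass that mutates a defaultdict through a 26-branch if/elif chain by three staged passes: label every operation via a fully-evaluated CNF rules table (list of all matching categories, first hit taken), dedup the labels for key order, then build each category's list by filtering the zipped (op, label) list.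
import Mathlib
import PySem

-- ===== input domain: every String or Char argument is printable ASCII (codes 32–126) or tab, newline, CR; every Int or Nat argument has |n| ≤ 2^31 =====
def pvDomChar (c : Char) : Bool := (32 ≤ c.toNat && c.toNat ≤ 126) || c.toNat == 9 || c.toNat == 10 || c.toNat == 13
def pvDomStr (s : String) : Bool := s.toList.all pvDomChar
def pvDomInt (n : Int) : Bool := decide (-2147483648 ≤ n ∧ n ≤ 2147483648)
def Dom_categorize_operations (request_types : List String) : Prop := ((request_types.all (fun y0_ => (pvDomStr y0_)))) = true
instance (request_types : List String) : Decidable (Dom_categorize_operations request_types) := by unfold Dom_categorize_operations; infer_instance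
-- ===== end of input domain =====

-- B restructures A's one-pass defaultdict/if-elif-chain loop into staged passes
-- (CNF rule-table labelling, dedup of labels, group-by-filter); objective: alternative, no speed claim.

-- ===== PORT A =====
-- A's loop body: defaultdict(list) + the 26-branch if/elif chain;
-- categories[k].append(op) = insert k (getD k [] ++ [op]).
def pvStepA (categories : PySem.Dict String (List String)) (op : String) : PySem.Dict String (List String) :=
  let op_lower := PySem.Str.lower op
  if PySem.Str.isIn "cell" op_lower || PySem.Str.isIn "values" op_lower then
    categories.insert "Cell Data" (categories.getD "Cell Data" [] ++ [op])
  else if PySem.Str.isIn "sheet" op_lower &&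
      (PySem.Str.isIn "add" op_lower || PySem.Str.isIn "delete" op_lower || PySem.Str.isIn "duplicate" op_lower) then
    categories.insert "Sheet Management" (categories.getD "Sheet Management" [] ++ [op])
  else if PySem.Str.isIn "sheet" op_lower then
    categories.insert "Sheet Properties" (categories.getD "Sheet Properties" [] ++ [op])
  else if PySem.Str.isIn "row" op_lower || PySem.Str.isIn "column" op_lower || PySem.Str.isIn "dimension" op_lower then
    categories.insert "Rows & Columns" (categories.getD "Rows & Columns" [] ++ [op])
  else if PySem.Str.isIn "format" op_lower || PySem.Str.isIn "border" op_lower || PySem.Str.isIn "merge" op_lower then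
    categories.insert "Formatting" (categories.getD "Formatting" [] ++ [op])
  else if PySem.Str.isIn "chart" op_lower then
    categories.insert "Charts" (categories.getD "Charts" [] ++ [op])
  else if PySem.Str.isIn "filter" op_lower then
    categories.insert "Filters" (categories.getD "Filters" [] ++ [op])
  else if PySem.Str.isIn "pivot" op_lower then
    categories.insert "Pivot Tables" (categories.getD "Pivot Tables" [] ++ [op])
  else if PySem.Str.isIn "conditional" op_lower then
    categories.insert "Conditional Formatting" (categories.getD "Conditional Formatting" [] ++ [op])
  else if PySem.Str.isIn "namedrange" op_lower then
    categories.insert "Named Ranges" (categories.getD "Named Ranges" [] ++ [op])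
  else if PySem.Str.isIn "protected" op_lower then
    categories.insert "Protection" (categories.getD "Protection" [] ++ [op])
  else if PySem.Str.isIn "banded" op_lower then
    categories.insert "Banded Ranges" (categories.getD "Banded Ranges" [] ++ [op])
  else if PySem.Str.isIn "slicer" op_lower then
    categories.insert "Slicers" (categories.getD "Slicers" [] ++ [op])
  else if PySem.Str.isIn "datasource" op_lower then
    categories.insert "Data Sources" (categories.getD "Data Sources" [] ++ [op])
  else if PySem.Str.isIn "developer" op_lower || PySem.Str.isIn "metadata" op_lower then
    categories.insert "Developer Metadata" (categories.getD "Developer Metadata" [] ++ [op])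
  else if PySem.Str.isIn "embed" op_lower then
    categories.insert "Embedded Objects" (categories.getD "Embedded Objects" [] ++ [op])
  else if PySem.Str.isIn "find" op_lower || PySem.Str.isIn "replace" op_lower then
    categories.insert "Find & Replace" (categories.getD "Find & Replace" [] ++ [op])
  else if PySem.Str.isIn "copy" op_lower || PySem.Str.isIn "paste" op_lower || PySem.Str.isIn "cut" op_lower then
    categories.insert "Copy & Paste" (categories.getD "Copy & Paste" [] ++ [op])
  else if PySem.Str.isIn "sort" op_lower then
    categories.insert "Sorting" (categories.getD "Sorting" [] ++ [op])
  else if PySem.Str.isIn "group" op_lower then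
    categories.insert "Grouping" (categories.getD "Grouping" [] ++ [op])
  else if PySem.Str.isIn "spreadsheet" op_lower then
    categories.insert "Spreadsheet Properties" (categories.getD "Spreadsheet Properties" [] ++ [op])
  else if PySem.Str.isIn "table" op_lower then
    categories.insert "Tables" (categories.getD "Tables" [] ++ [op])
  else if PySem.Str.isIn "text" op_lower then
    categories.insert "Text Operations" (categories.getD "Text Operations" [] ++ [op])
  else if PySem.Str.isIn "trim" op_lower then
    categories.insert "Data Cleanup" (categories.getD "Data Cleanup" [] ++ [op])
  else if PySem.Str.isIn "refresh" op_lower then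
    categories.insert "Refresh" (categories.getD "Refresh" [] ++ [op])
  else
    categories.insert "Other" (categories.getD "Other" [] ++ [op])

def categorize_operations (request_types : List String) : List (String × List String) :=
  (request_types.foldl pvStepA PySem.Dict.empty).items

-- ===== PORT B =====
-- B's rules table: (category, clauses); a clause matches when some substring occurs.
def pvRules : List (String × List (List String)) :=
  [ ("Cell Data", [["cell", "values"]]),
    ("Sheet Management", [["sheet"], ["add", "delete", "duplicate"]]),
    ("Sheet Properties", [["sheet"]]),
    ("Rows & Columns", [["row", "column", "dimension"]]),
    ("Formatting", [["format", "border", "merge"]]),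
    ("Charts", [["chart"]]),
    ("Filters", [["filter"]]),
    ("Pivot Tables", [["pivot"]]),
    ("Conditional Formatting", [["conditional"]]),
    ("Named Ranges", [["namedrange"]]),
    ("Protection", [["protected"]]),
    ("Banded Ranges", [["banded"]]),
    ("Slicers", [["slicer"]]),
    ("Data Sources", [["datasource"]]),
    ("Developer Metadata", [["developer", "metadata"]]),
    ("Embedded Objects", [["embed"]]),
    ("Find & Replace", [["find", "replace"]]),
    ("Copy & Paste", [["copy", "paste", "cut"]]),
    ("Sorting", [["sort"]]),
    ("Grouping", [["group"]]),
    ("Spreadsheet Properties", [["spreadsheet"]]),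
    ("Tables", [["table"]]),
    ("Text Operations", [["text"]]),
    ("Data Cleanup", [["trim"]]),
    ("Refresh", [["refresh"]]) ]

-- B's _label: all matching categories by comprehension, first hit or "Other".
def pvLabel (op : String) : String :=
  let low := PySem.Str.lower op
  let hits := (pvRules.filter (fun r =>
      r.2.all (fun clause => clause.any (fun p => PySem.Str.isIn p low)))).map Prod.fst
  match hits with
  | [] => "Other"
  | c :: _ => c

-- labels pass, dedup pass (list(dict.fromkeys(..))), then group-by-filter comprehension.
def categorize_operations_alt (request_types : List String) : List (String × List String) :=
  let labels := request_types.map pvLabel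
  let order := PySem.List.dedup labels
  order.map (fun cat =>
    (cat, ((request_types.zip labels).filter (fun p => p.2 == cat)).map Prod.fst))

-- ===== PRECONDITION & SPEC =====
def Spec_categorize_operations (request_types : List String) (out : List (String × List String)) : Prop := out = categorize_operations_alt request_types
instance (request_types : List String) (out : List (String × List String)) : Decidable (Spec_categorize_operations request_types out) := by unfold Spec_categorize_operations; infer_instance

-- ===== CLAIM (what is proved, stated in full; the proofs are below) =====
def Claim_equal_categorize_operations : Prop := ∀ (request_types : List String), Dom_categorize_operations request_types → Spec_categorize_operations request_types (categorize_operations request_types)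

-- ===== LEMMAS AND PROOFS =====

-- A's chain, as a first-match recursion over a rules list (proof-local helper).
def pvChain : List (String × List (List String)) → String → String
  | [], _ => "Other"
  | (cat, clauses) :: rest, low =>
      if clauses.all (fun clause => clause.any (fun p => PySem.Str.isIn p low)) then cat
      else pvChain rest low

-- B's filter-then-head label equals the first-match recursion, over any rules list.
theorem pvHead_filter_eq_chain (rules : List (String × List (List String))) (low : String) :
    (match (rules.filter (fun r =>
        r.2.all (fun clause => clause.any (fun p => PySem.Str.isIn p low)))).map Prod.fst with
      | [] => "Other"
      | c :: _ => c) = pvChain rules low := by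
  induction rules with
  | nil => rfl
  | cons r rest ih =>
    obtain ⟨cat, clauses⟩ := r
    rw [List.filter_cons]
    by_cases h : (clauses.all (fun clause => clause.any (fun p => PySem.Str.isIn p low))) = true
    · simp only [pvChain, if_pos h, List.map_cons]
    · simp only [pvChain, if_neg h]
      exact ih

theorem pvLabel_eq_chain (op : String) :
    pvLabel op = pvChain pvRules (PySem.Str.lower op) := by
  unfold pvLabel
  exact pvHead_filter_eq_chain pvRules (PySem.Str.lower op)

-- A's step is "modify at the selected key".
theorem pvStepA_eq (d : PySem.Dict String (List String)) (op : String) :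
    pvStepA d op = d.modify (pvLabel op) [] (fun v => v ++ [op]) := by
  rw [pvLabel_eq_chain]
  unfold pvStepA pvChain
  simp only [pvRules, pvChain, List.all_cons, List.all_nil, List.any_cons, List.any_nil,
    Bool.and_true, Bool.or_false, Bool.or_assoc, PySem.Dict.modify,
    apply_ite (fun k : String => PySem.Dict.insert d k (PySem.Dict.getD d k [] ++ [op]))]

-- zip a list with its own map = map of pairs.
theorem pvZip_map_self {α β : Type} (l : List α) (g : α → β) :
    l.zip (l.map g) = l.map (fun a => (a, g a)) := by
  rw [show l.zip (l.map g) = (l.map id).zip (l.map g) by simp, List.zip_map']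
  simp

-- ===== VERDICT (by name: the statement is the Claim_ definition above) =====
set_option maxHeartbeats 1000000 in
theorem categorize_operations_spec : Claim_equal_categorize_operations := by
  intro l _
  unfold Spec_categorize_operations
  simp only [categorize_operations, categorize_operations_alt]
  have h1 : List.foldl pvStepA PySem.Dict.empty l
      = List.foldl (fun d p => PySem.Dict.modify d p.1 [] (fun v => v ++ [p.2]))
          PySem.Dict.empty (l.map (fun op => (pvLabel op, op))) := by
    rw [List.foldl_map]
    exact PySem.List.foldl_congr_mem l _ _ _ (fun acc x _ => pvStepA_eq acc x)
  rw [h1]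
  rw [PySem.Dict.items_eq_map_keys _
      (PySem.Dict.nodup_keys_foldl_modify_key _ Prod.fst [] (fun _ p => fun v => v ++ [p.2]) _
        PySem.Dict.nodup_keys_empty) []]
  rw [PySem.Dict.keys_foldl_modify_key _ Prod.fst [] (fun _ p => fun v => v ++ [p.2])]
  simp only [PySem.Dict.keys_empty, PySem.Set.update_nil_left, List.map_map,
    PySem.List.dedup_eq_ofList]
  apply List.map_congr_left
  intro c _
  rw [PySem.Dict.getD_foldl_modify_append, PySem.Dict.getD_empty]
  rw [pvZip_map_self, List.filter_map, List.filter_map, List.map_map, List.map_map]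
  simp [Function.comp_def]
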